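-- pv_equiv track=rewrite | github.com/md-hossain17/Programming_tasks | week10/A10_t5.py | recursiveFactorialWithLimit
-- ===== SOURCE A (Python) =====
-- def recursiveFactorialWithLimit(PNum: int, recursion_limit: int = 1000) -> int:
--     """
--     Calculate factorial recursively with safety check.
--
--     Args:
--         PNum: Non-negative integer
--         recursion_limit: Maximum allowed recursion depth
--
--     Returns:
--         Factorial of PNum
--     """
--     if PNum < 0:
--         raise ValueError("Factorial is not defined for negative numbers")
--
--     # Safety check to prevent excessive recursion
--     if PNum > recursion_limit:
--         raise RecursionError(f"Number exceeds safe recursion limit of {recursion_limit}")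
--
--     if PNum <= 1:
--         return 1
--
--     return PNum * recursiveFactorialWithLimit(PNum - 1, recursion_limit)
-- ===== SOURCE B (Python) =====
-- def recursiveFactorialWithLimit(PNum: int, recursion_limit: int = 1000) -> int:
--     """Calculate factorial with an iterative accumulator loop (same guard checks)."""
--     if PNum < 0:
--         raise ValueError("Factorial is not defined for negative numbers")
--     if PNum > recursion_limit:
--         raise RecursionError(f"Number exceeds safe recursion limit of {recursion_limit}")
--     result = 1
--     for i in range(2, PNum + 1):
--         result *= i
--     return result
-- ===== Notes on version B (the rewrite author's own statement) =====
-- stated objective: simpler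
-- what changed: Replaced the recursive descent with a single accumulator loop over range(2, PNum+1); both guard checks are done once up front (valid since PNum only decreases in A, so only the initial check can fire).
import Mathlib
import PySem

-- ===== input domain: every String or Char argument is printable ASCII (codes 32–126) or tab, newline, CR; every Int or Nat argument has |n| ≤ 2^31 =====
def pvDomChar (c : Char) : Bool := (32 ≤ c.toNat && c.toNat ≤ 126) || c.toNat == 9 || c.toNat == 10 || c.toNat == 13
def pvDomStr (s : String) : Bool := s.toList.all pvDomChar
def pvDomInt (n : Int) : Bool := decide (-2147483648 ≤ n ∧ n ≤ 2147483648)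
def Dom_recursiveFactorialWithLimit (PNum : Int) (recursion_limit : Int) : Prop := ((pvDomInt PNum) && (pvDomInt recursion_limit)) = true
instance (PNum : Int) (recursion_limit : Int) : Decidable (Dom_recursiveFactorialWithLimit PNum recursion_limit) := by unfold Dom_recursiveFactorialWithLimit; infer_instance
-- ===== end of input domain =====

-- B replaces A's recursive descent by a single accumulator loop over range(2, PNum+1)
-- with the same two up-front guard checks: simpler, no deep call stack.


-- ===== PORT A =====
-- literal port of A: guards raise outside Pre_; the recursion is the value computation
def recursiveFactorialWithLimit (PNum : Int) (recursion_limit : Int) : Int :=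
  if PNum ≤ 1 then 1
  else PNum * recursiveFactorialWithLimit (PNum - 1) recursion_limit
termination_by PNum.toNat
decreasing_by omega

-- ===== PORT B =====
-- literal port of B: result = 1; for i in range(2, PNum+1): result *= i
def recursiveFactorialWithLimit_alt (PNum : Int) (recursion_limit : Int) : Int :=
  (PySem.List.pyRange 2 (PNum + 1) 1).foldl (fun result i => result * i) 1

-- ===== PRECONDITION & SPEC =====
-- Pre_ excludes exactly the inputs where A raises: PNum < 0 (ValueError) and
-- PNum > recursion_limit (A's own RecursionError).
def Pre_recursiveFactorialWithLimit (PNum : Int) (recursion_limit : Int) : Prop :=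
  0 ≤ PNum ∧ PNum ≤ recursion_limit
instance (PNum : Int) (recursion_limit : Int) : Decidable (Pre_recursiveFactorialWithLimit PNum recursion_limit) := by unfold Pre_recursiveFactorialWithLimit; infer_instance
def pvWitness_recursiveFactorialWithLimit : Int × Int := (5, 1000)
def Spec_recursiveFactorialWithLimit (PNum : Int) (recursion_limit : Int) (out : Int) : Prop := out = recursiveFactorialWithLimit_alt PNum recursion_limit
instance (PNum : Int) (recursion_limit : Int) (out : Int) : Decidable (Spec_recursiveFactorialWithLimit PNum recursion_limit out) := by unfold Spec_recursiveFactorialWithLimit; infer_instance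

-- ===== CLAIM (what is proved, stated in full; the proofs are below) =====
def Claim_equal_recursiveFactorialWithLimit : Prop := ∀ (PNum : Int) (recursion_limit : Int), Dom_recursiveFactorialWithLimit PNum recursion_limit → Pre_recursiveFactorialWithLimit PNum recursion_limit → Spec_recursiveFactorialWithLimit PNum recursion_limit (recursiveFactorialWithLimit PNum recursion_limit)

-- ===== LEMMAS AND PROOFS =====

-- A equals B on ALL inputs (the guards aside, both are total value computations)
theorem fact_eq (PNum recursion_limit : Int) :
    recursiveFactorialWithLimit PNum recursion_limit
      = recursiveFactorialWithLimit_alt PNum recursion_limit := by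
  by_cases h : PNum ≤ 1
  · rw [recursiveFactorialWithLimit]
    simp only [h, if_true]
    have : PNum + 1 - 2 ≤ 0 := by omega
    simp [recursiveFactorialWithLimit_alt, PySem.List.pyRange_one,
      Int.toNat_of_nonpos this]
  · rw [recursiveFactorialWithLimit]
    simp only [h, if_false]
    rw [fact_eq (PNum - 1) recursion_limit]
    unfold recursiveFactorialWithLimit_alt
    rw [show PNum + 1 = (PNum - 1 + 1) + 1 by ring,
        PySem.List.pyRange_one_succ_right (by omega : (2:Int) ≤ PNum - 1 + 1),
        List.foldl_append]
    simp only [List.foldl]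
    rw [show PNum - 1 + 1 = PNum by ring]
    generalize (PySem.List.pyRange 2 (PNum - 1 + 1) 1).foldl (fun result i => result * i) 1 = r
    ring
termination_by PNum.toNat
decreasing_by omega

-- ===== VERDICT (by name: the statement is the Claim_ definition above) =====
theorem recursiveFactorialWithLimit_spec : Claim_equal_recursiveFactorialWithLimit := by
  intro PNum recursion_limit _ _
  unfold Spec_recursiveFactorialWithLimit
  exact fact_eq PNum recursion_limit
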